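-- pv_equiv track=rewrite | github.com/lidongze6/leetcode- | 面试题 17.08. 马戏团人塔-2.py | bestSeqAtIndex
-- ===== SOURCE A (Python) =====
-- def bestSeqAtIndex(height, weight) -> int:
--     import bisect
--     arr = list(zip(height, weight))
--     arr.sort(key=lambda x: (x[0], -x[1]))
--     dp = []
--     for _, w in arr:
--         i = bisect.bisect_left(dp, w)
--         if i == len(dp):
--             dp.append(w)
--         else:
--             dp[i] = w
--     return len(dp)
-- ===== SOURCE B (Python) =====
-- def bestSeqAtIndex(height, weight) -> int:
--     arr = sorted(zip(height, weight), key=lambda x: (x[0], -x[1]))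
--     f = []  # list of (w, d): d = length of longest strictly w-increasing chain ending at this element
--     for _, w in arr:
--         best = 0
--         for w2, d in f:
--             if w2 < w and d > best:
--                 best = d
--         f.append((w, best + 1))
--     ans = 0
--     for _, d in f:
--         if d > ans:
--             ans = d
--     return ans
-- ===== Notes on version B (the rewrite author's own statement) =====
-- stated objective: alternative
-- what changed: Replaces the patience-sorting tails array with binary search by the classic quadratic LIS dynamic program on the weights: for each element it scans all earlier elements for the best strictly-smaller-weight chain, and returns the maximum chain length.
import Mathlib
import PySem

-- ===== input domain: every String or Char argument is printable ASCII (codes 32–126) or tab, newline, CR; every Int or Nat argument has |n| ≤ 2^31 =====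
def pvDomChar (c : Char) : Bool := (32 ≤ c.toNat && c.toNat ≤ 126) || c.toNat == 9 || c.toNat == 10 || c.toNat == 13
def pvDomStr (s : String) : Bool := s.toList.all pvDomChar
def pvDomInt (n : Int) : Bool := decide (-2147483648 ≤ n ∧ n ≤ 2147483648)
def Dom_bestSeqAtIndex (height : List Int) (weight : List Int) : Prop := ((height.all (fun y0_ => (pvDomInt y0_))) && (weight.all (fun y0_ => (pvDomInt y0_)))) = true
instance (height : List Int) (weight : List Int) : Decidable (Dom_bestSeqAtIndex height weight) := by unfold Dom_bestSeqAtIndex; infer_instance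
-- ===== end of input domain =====

-- B replaces A's patience-sorting tails array (bisect) with the classic quadratic LIS DP; same value, different algorithm.

-- ===== PORT A =====
-- one iteration of A's loop body: bisect into dp, then append or overwrite
def stepA (dp : List Int) (w : Int) : List Int :=
  let i := PySem.List.bisectLeft dp w
  if i = dp.length then dp ++ [w] else dp.set i w

def bestSeqAtIndex (height : List Int) (weight : List Int) : Int :=
  let arr := PySem.List.sorted2 (height.zip weight) (fun x => x.1) (fun x => -x.2)
  let dp := arr.foldl (fun dp p => stepA dp p.2) []
  (dp.length : Int)

-- ===== PORT B =====
-- inner scan of B: best chain length among earlier elements of strictly smaller weight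
def bestOf (f : List (Int × Int)) (w : Int) : Int :=
  f.foldl (fun b p => if p.1 < w ∧ b < p.2 then p.2 else b) 0

def stepB (f : List (Int × Int)) (w : Int) : List (Int × Int) :=
  f ++ [(w, bestOf f w + 1)]

-- final scan of B: maximum chain length (0 when empty)
def fmax (f : List (Int × Int)) : Int :=
  f.foldl (fun m p => if m < p.2 then p.2 else m) 0

def bestSeqAtIndex_alt (height : List Int) (weight : List Int) : Int :=
  let arr := PySem.List.sorted2 (height.zip weight) (fun x => x.1) (fun x => -x.2)
  fmax (arr.foldl (fun f p => stepB f p.2) [])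

-- ===== PRECONDITION & SPEC =====
def Spec_bestSeqAtIndex (height : List Int) (weight : List Int) (out : Int) : Prop := out = bestSeqAtIndex_alt height weight
instance (height : List Int) (weight : List Int) (out : Int) : Decidable (Spec_bestSeqAtIndex height weight out) := by unfold Spec_bestSeqAtIndex; infer_instance

-- ===== CLAIM (what is proved, stated in full; the proofs are below) =====
def Claim_equal_bestSeqAtIndex : Prop := ∀ (height : List Int) (weight : List Int), Dom_bestSeqAtIndex height weight → Spec_bestSeqAtIndex height weight (bestSeqAtIndex height weight)

-- ===== LEMMAS AND PROOFS =====

-- Invariant tying B's DP table f to A's tails array t: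
-- t is strictly increasing, its length is the current best chain length,
-- every DP entry (v, d) sits at level d-1 with t[d-1] ≤ v, and each level k of t
-- is witnessed by a DP entry (t[k], k+1).
def InvAB (f : List (Int × Int)) (t : List Int) : Prop :=
  t.Pairwise (· < ·) ∧
  (t.length : Int) = fmax f ∧
  (∀ p ∈ f, ∃ (k : Nat) (hk : k < t.length), p.2 = (k : Int) + 1 ∧ t[k] ≤ p.1) ∧
  (∀ (k : Nat) (hk : k < t.length), (t[k], (k : Int) + 1) ∈ f)

lemma bestOf_spec (f : List (Int × Int)) (w : Int) :
    0 ≤ bestOf f w ∧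
    (bestOf f w = 0 ∨ ∃ p ∈ f, p.1 < w ∧ p.2 = bestOf f w) ∧
    (∀ p ∈ f, p.1 < w → p.2 ≤ bestOf f w) := by
  have go : ∀ (g : List (Int × Int)) (b : Int),
      b ≤ g.foldl (fun b p => if p.1 < w ∧ b < p.2 then p.2 else b) b ∧
      (g.foldl (fun b p => if p.1 < w ∧ b < p.2 then p.2 else b) b = b ∨
        ∃ p ∈ g, p.1 < w ∧ p.2 = g.foldl (fun b p => if p.1 < w ∧ b < p.2 then p.2 else b) b) ∧
      (∀ p ∈ g, p.1 < w → p.2 ≤ g.foldl (fun b p => if p.1 < w ∧ b < p.2 then p.2 else b) b) := by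
    intro g
    induction g with
    | nil => intro b; simp
    | cons q rest ih =>
      intro b
      simp only [List.foldl_cons]
      obtain ⟨h1, h2, h3⟩ := ih (if q.1 < w ∧ b < q.2 then q.2 else b)
      by_cases hq : q.1 < w ∧ b < q.2
      · rw [if_pos hq] at h1 h2 h3 ⊢
        refine ⟨le_trans (le_of_lt hq.2) h1, ?_, ?_⟩
        · rcases h2 with h2 | ⟨p, hp, hpw, hpe⟩
          · exact Or.inr ⟨q, List.mem_cons_self, hq.1, h2.symm⟩
          · exact Or.inr ⟨p, List.mem_cons_of_mem _ hp, hpw, hpe⟩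
        · intro p hp hpw
          rcases List.mem_cons.mp hp with rfl | hp
          · exact h1
          · exact h3 p hp hpw
      · rw [if_neg hq] at h1 h2 h3 ⊢
        refine ⟨h1, ?_, ?_⟩
        · rcases h2 with h2 | ⟨p, hp, hpw, hpe⟩
          · exact Or.inl h2
          · exact Or.inr ⟨p, List.mem_cons_of_mem _ hp, hpw, hpe⟩
        · intro p hp hpw
          rcases List.mem_cons.mp hp with rfl | hp
          · have : ¬ b < p.2 := fun hb => hq ⟨hpw, hb⟩
            omega
          · exact h3 p hp hpw
  obtain ⟨h1, h2, h3⟩ := go f 0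
  exact ⟨h1, h2, h3⟩

lemma fmax_append (f : List (Int × Int)) (w d : Int) :
    fmax (f ++ [(w, d)]) = if fmax f < d then d else fmax f := by
  unfold fmax
  rw [List.foldl_append]
  simp only [List.foldl_cons, List.foldl_nil]

lemma step_inv (f : List (Int × Int)) (t : List Int) (w : Int) (h : InvAB f t) :
    InvAB (stepB f w) (stepA t w) := by
  obtain ⟨hsort, hlen, hmem, hwit⟩ := h
  have hle : t.Pairwise (· ≤ ·) := hsort.imp (fun h => le_of_lt h)
  obtain ⟨hi1, hi2, hi3⟩ := PySem.List.bisectLeft_spec t w hle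
  obtain ⟨hb0, hbex, hbub⟩ := bestOf_spec f w
  set i := PySem.List.bisectLeft t w with hidef
  set M := bestOf f w with hMdef
  have hmono := List.pairwise_iff_getElem.mp hsort
  have hMi : M = (i : Int) := by
    have hub : M ≤ (i : Int) := by
      rcases hbex with h0 | ⟨p, hp, hpw, hpM⟩
      · omega
      · obtain ⟨k, hk, hpk, htk⟩ := hmem p hp
        have hki : k < i := by
          by_contra hges
          have := hi3 k hk (by omega)
          omega
        omega
    have hlb : (i : Int) ≤ M := by
      rcases Nat.eq_zero_or_pos i with h0 | hpos
      · omega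
      · have hk : i - 1 < t.length := by omega
        have hw : t[i-1] < w := hi2 (i-1) hk (by omega)
        have := hbub _ (hwit (i-1) hk) hw
        omega
    omega
  simp only [stepA, stepB, ← hidef, ← hMdef]
  by_cases hcase : i = t.length
  · rw [if_pos hcase]
    refine ⟨?_, ?_, ?_, ?_⟩
    · rw [List.pairwise_append]
      refine ⟨hsort, List.pairwise_singleton _ _, ?_⟩
      intro a ha b hb
      rw [List.mem_singleton] at hb; subst hb
      obtain ⟨j, hj, rfl⟩ := List.mem_iff_getElem.mp ha
      exact hi2 j hj (by omega)
    · rw [fmax_append, ← hlen]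
      simp only [List.length_append, List.length_singleton]
      push_cast
      split_ifs <;> omega
    · intro p hp
      rcases List.mem_append.mp hp with hp | hp
      · obtain ⟨k, hk, h1, h2⟩ := hmem p hp
        exact ⟨k, by simp only [List.length_append, List.length_singleton]; omega,
          h1, by rw [List.getElem_append_left hk]; exact h2⟩
      · rw [List.mem_singleton] at hp; subst hp
        refine ⟨t.length, by rw [List.length_append, List.length_singleton]; omega, ?_, ?_⟩
        · simp only; omega
        · exact le_of_eq (List.getElem_concat_length rfl _)
    · intro k hk
      rw [List.length_append, List.length_singleton] at hk
      rcases Nat.lt_or_ge k t.length with hklt | hkge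
      · rw [List.getElem_append_left hklt]
        exact List.mem_append_left _ (hwit k hklt)
      · have hkeq : k = t.length := by omega
        subst hkeq
        rw [List.getElem_concat_length rfl]
        refine List.mem_append_right _ ?_
        have : M + 1 = (t.length : Int) + 1 := by omega
        rw [this]
        exact List.mem_singleton_self _
  · rw [if_neg hcase]
    have hilt : i < t.length := lt_of_le_of_ne hi1 hcase
    have hwle : w ≤ t[i] := hi3 i hilt le_rfl
    refine ⟨?_, ?_, ?_, ?_⟩
    · rw [List.pairwise_iff_getElem]
      intro a b ha hb hab
      rw [List.length_set] at ha hb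
      rw [List.getElem_set, List.getElem_set]
      by_cases h1 : i = a <;> by_cases h2 : i = b
      · omega
      · rw [if_pos h1, if_neg h2]
        subst h1
        exact lt_of_le_of_lt hwle (hmono i b hilt hb hab)
      · rw [if_neg h1, if_pos h2]
        subst h2
        exact hi2 a ha (by omega)
      · rw [if_neg h1, if_neg h2]
        exact hmono a b ha hb hab
    · rw [fmax_append, List.length_set, ← hlen]
      split_ifs <;> omega
    · intro p hp
      rcases List.mem_append.mp hp with hp | hp
      · obtain ⟨k, hk, h1, h2⟩ := hmem p hp
        refine ⟨k, by rw [List.length_set]; exact hk, h1, ?_⟩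
        rw [List.getElem_set]
        split_ifs with hki
        · exact le_trans (hki ▸ hwle) h2
        · exact h2
      · rw [List.mem_singleton] at hp; subst hp
        refine ⟨i, by rw [List.length_set]; exact hilt, by simp only; omega, ?_⟩
        rw [List.getElem_set, if_pos rfl]
    · intro k hk
      rw [List.length_set] at hk
      rw [List.getElem_set]
      split_ifs with hki
      · subst hki
        refine List.mem_append_right _ ?_
        have : (i : Int) + 1 = M + 1 := by omega
        rw [← this]
        exact List.mem_singleton_self _
      · exact List.mem_append_left _ (hwit k hk)

lemma fold_inv (arr : List (Int × Int)) :
    ∀ (f : List (Int × Int)) (t : List Int), InvAB f t →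
    InvAB (arr.foldl (fun f p => stepB f p.2) f) (arr.foldl (fun dp p => stepA dp p.2) t) := by
  intro f t h
  induction arr generalizing f t with
  | nil => exact h
  | cons p rest ih => exact ih _ _ (step_inv f t p.2 h)

lemma inv_nil : InvAB [] [] := by
  refine ⟨List.Pairwise.nil, rfl, ?_, ?_⟩ <;> simp

-- ===== VERDICT (by name: the statement is the Claim_ definition above) =====
theorem bestSeqAtIndex_spec : Claim_equal_bestSeqAtIndex := by
  intro height weight _
  unfold Spec_bestSeqAtIndex bestSeqAtIndex bestSeqAtIndex_alt
  exact (fold_inv _ [] [] inv_nil).2.1
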